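-- pv_equiv track=rewrite | github.com/NgMinhDucc/Learning_Python | Lucky_Number.py | luck_num
-- ===== SOURCE A (Python) =====
-- def luck_num(n):
--     cnt = 0
--     for i in n:
--         if i != "6" and i  != "8":
--             return "NO"
--         if i == "8":
--             cnt += 1
--         else:
--             cnt = 0
--         if cnt == 3:
--             return "NO"
--     return "YES"
-- ===== SOURCE B (Python) =====
-- def luck_num(n):
--     return "YES" if set(n) <= {"6", "8"} and "888" not in n else "NO"
-- ===== Notes on version B (the rewrite author's own statement) =====
-- stated objective: simpler
-- what changed: Replaces the stateful single pass with a running counter by two independent checks: character validity via a set-subset test and the forbidden triple-eight run via a substring search.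
import Mathlib
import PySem

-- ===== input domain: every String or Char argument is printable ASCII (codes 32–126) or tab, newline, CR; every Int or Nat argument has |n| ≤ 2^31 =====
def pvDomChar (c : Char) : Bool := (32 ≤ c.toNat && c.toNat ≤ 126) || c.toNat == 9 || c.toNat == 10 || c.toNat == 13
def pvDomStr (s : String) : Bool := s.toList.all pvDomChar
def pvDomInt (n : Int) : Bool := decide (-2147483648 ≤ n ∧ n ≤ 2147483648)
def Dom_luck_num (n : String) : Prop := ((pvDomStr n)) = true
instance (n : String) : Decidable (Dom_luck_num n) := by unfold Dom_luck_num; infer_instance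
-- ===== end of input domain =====

-- B replaces A's single stateful counter pass by two independent checks (set-subset validity and a '888' substring search) for simplicity; same cost.


-- ===== PORT A =====
-- the for-loop over the string's characters with the running counter `cnt`
def luckLoop : List Char → Int → String
  | [], _ => "YES"
  | c :: cs, cnt =>
    if c ≠ '6' ∧ c ≠ '8' then "NO"
    else
      let cnt' : Int := if c = '8' then cnt + 1 else 0
      if cnt' = 3 then "NO" else luckLoop cs cnt'

def luck_num (n : String) : String := luckLoop n.toList 0

-- ===== PORT B =====
def luck_num_alt (n : String) : String :=
  if PySem.Set.issubset (PySem.Set.ofList n.toList) (PySem.Set.ofList ['6', '8'])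
      && !(PySem.Str.isIn "888" n) then "YES" else "NO"

-- ===== PRECONDITION & SPEC =====
def Spec_luck_num (n : String) (out : String) : Prop := out = luck_num_alt n
instance (n : String) (out : String) : Decidable (Spec_luck_num n out) := by unfold Spec_luck_num; infer_instance

-- ===== CLAIM (what is proved, stated in full; the proofs are below) =====
def Claim_equal_luck_num : Prop := ∀ (n : String), Dom_luck_num n → Spec_luck_num n (luck_num n)

-- ===== LEMMAS AND PROOFS =====

theorem rep_pref {j k : Nat} (h : j ≤ k) (a : Char) :
    List.replicate j a <+: List.replicate k a :=
  (List.prefix_iff_eq_take).2 (by simp [List.take_replicate, Nat.min_eq_left h])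

-- invariant of A's loop: cnt counts the current trailing run of '8's already consumed
theorem luckLoop_eq (cs : List Char) : ∀ (cnt : Nat), cnt ≤ 2 →
    luckLoop cs (cnt : Int) =
      if cs.all (fun c => c = '6' || c = '8')
          && !(decide (List.replicate (3 - cnt) '8' <+: cs) || decide (['8', '8', '8'] <:+: cs))
        then "YES" else "NO" := by
  induction cs with
  | nil =>
    intro cnt h
    have h1 : ¬ (List.replicate (3 - cnt) '8' <+: ([] : List Char)) := by
      rw [List.prefix_nil]
      simp only [List.replicate_eq_nil_iff]
      omega
    simp only [luckLoop, h1, List.all_nil, List.infix_nil, decide_false]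
    simp
  | cons c cs ih =>
    intro cnt h
    by_cases hv : c = '6' ∨ c = '8'
    · rcases hv with h6 | h8
      · subst h6
        have h1 : ¬ (List.replicate (3 - cnt) '8' <+: '6' :: cs) := by
          intro hp
          have : 3 - cnt = (3 - cnt - 1) + 1 := by omega
          rw [this, List.replicate_succ, List.cons_prefix_cons] at hp
          exact absurd hp.1 (by decide)
        have h2 : (['8', '8', '8'] <:+: '6' :: cs) ↔ (['8', '8', '8'] <:+: cs) := by
          rw [List.infix_cons_iff]
          constructor
          · rintro (hp | hi)
            · rw [List.cons_prefix_cons] at hp; exact absurd hp.1 (by decide)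
            · exact hi
          · exact Or.inr
        have h3 : (List.replicate 3 '8' <+: cs) → (['8', '8', '8'] <:+: cs) := by
          intro hp
          exact (show List.replicate 3 '8' = ['8', '8', '8'] by rfl) ▸ hp.isInfix
        rw [show luckLoop ('6' :: cs) (cnt : Int) = luckLoop cs ((0 : Nat) : Int) by
          simp [luckLoop]]
        rw [ih 0 (by omega)]
        simp only [List.all_cons, h1, h2]
        by_cases hb : (['8', '8', '8'] <:+: cs)
        · simp_all
        · have h4 : ¬ (List.replicate 3 '8' <+: cs) := mt h3 hb
          simp_all
      · subst h8
        by_cases h2 : cnt = 2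
        · subst h2
          have h1 : List.replicate (3 - 2) '8' <+: '8' :: cs := by
            simp [List.replicate_succ, List.cons_prefix_cons]
          simp [luckLoop]
        · have hlt : cnt ≤ 1 := by omega
          have hne : ¬ ((cnt : Int) + 1 = 3) := by omega
          have hstep : luckLoop ('8' :: cs) (cnt : Int) = luckLoop cs (((cnt + 1 : Nat)) : Int) := by
            simp [luckLoop, hne]
          rw [hstep, ih (cnt + 1) (by omega)]
          have hrep : (List.replicate (3 - cnt) '8' <+: '8' :: cs) ↔
              (List.replicate (3 - (cnt + 1)) '8' <+: cs) := by
            have : 3 - cnt = (3 - (cnt + 1)) + 1 := by omega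
            rw [this, List.replicate_succ, List.cons_prefix_cons]
            simp
          have hinf : (['8', '8', '8'] <:+: '8' :: cs) ↔
              (['8', '8'] <+: cs ∨ ['8', '8', '8'] <:+: cs) := by
            rw [List.infix_cons_iff, List.cons_prefix_cons]
            simp
          have habs : (['8', '8'] <+: cs) → (List.replicate (3 - (cnt + 1)) '8' <+: cs) := by
            intro hp
            exact (rep_pref (show 3 - (cnt + 1) ≤ 2 by omega) '8').trans
              ((show List.replicate 2 '8' = ['8', '8'] by rfl) ▸ hp)
          simp only [List.all_cons, hrep, hinf]
          by_cases hb : (List.replicate (3 - (cnt + 1)) '8' <+: cs)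
          · simp_all
          · have h4 : ¬ (['8', '8'] <+: cs) := mt habs hb
            simp_all
    · rw [not_or] at hv
      simp [luckLoop, hv, List.all_cons]

theorem issubset_eq_all (cs : List Char) :
    PySem.Set.issubset (PySem.Set.ofList cs) (PySem.Set.ofList ['6', '8'])
      = cs.all (fun c => c = '6' || c = '8') := by
  by_cases h : ∀ c ∈ cs, c = '6' ∨ c = '8'
  · rw [show cs.all (fun c => c = '6' || c = '8') = true by simp_all]
    rw [PySem.Set.issubset_iff]
    intro x hx
    rcases h x ((PySem.Set.mem_ofList _ _).1 hx) with h' | h' <;> subst h' <;>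
      exact (PySem.Set.mem_ofList _ _).2 (by simp)
  · rw [show cs.all (fun c => c = '6' || c = '8') = false by simp_all]
    rw [Bool.eq_false_iff]
    intro hs
    apply h
    intro c hc
    have := ((PySem.Set.issubset_iff _ _).1 hs) c ((PySem.Set.mem_ofList _ _).2 hc)
    rcases (PySem.Set.mem_ofList _ _).1 this with h' | h' <;> simp_all

-- ===== VERDICT (by name: the statement is the Claim_ definition above) =====
theorem luck_num_spec : Claim_equal_luck_num := by
  intro n _
  unfold Spec_luck_num luck_num luck_num_alt
  rw [show (0 : Int) = ((0 : Nat) : Int) by rfl, luckLoop_eq n.toList 0 (by omega)]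
  have h3 : (List.replicate 3 '8' <+: n.toList) → (['8', '8', '8'] <:+: n.toList) := by
    intro hp
    exact (show List.replicate 3 '8' = ['8', '8', '8'] by rfl) ▸ hp.isInfix
  have htl : "888".toList = ['8', '8', '8'] := rfl
  have hin : PySem.Str.isIn "888" n = decide (['8', '8', '8'] <:+: n.toList) := by
    by_cases hb : (['8', '8', '8'] <:+: n.toList)
    · simp only [hb, decide_true]
      exact (PySem.Str.isIn_iff_infix _ _).2 (htl ▸ hb)
    · simp only [hb, decide_false, Bool.eq_false_iff]
      intro hc
      exact hb (htl ▸ (PySem.Str.isIn_iff_infix _ _).1 hc)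
  rw [issubset_eq_all, hin]
  by_cases hb : (['8', '8', '8'] <:+: n.toList)
  · simp_all
  · have h4 : ¬ (List.replicate 3 '8' <+: n.toList) := mt h3 hb
    simp_all
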